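-- pv_equiv track=rewrite | github.com/jalaln06/permutationgym | permutation_gym/utils/metrics.py | cayley_distance
-- ===== SOURCE A (Python) =====
-- from typing import List, Callable, Dict, Any
--
-- def cayley_distance(p1: List[int], p2: List[int]) -> int:
--     """
--     Calculate Cayley distance between two permutations.
--     (Minimum number of transpositions to transform p1 to p2)
--
--     Args:
--         p1, p2: Permutations to compare (must be integer permutations)
--
--     Returns:
--         Cayley distance
--     """
--     # Convert p2 to normalized form relative to p1
--     normalized_p2 = [p1.index(x) for x in p2]
--
--     # Count cycles in the permutation
--     visited = [False] * len(normalized_p2)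
--     cycle_count = 0
--
--     for i in range(len(normalized_p2)):
--         if not visited[i]:
--             cycle_count += 1
--             j = i
--             while not visited[j]:
--                 visited[j] = True
--                 j = normalized_p2[j]
--
--     # Distance is n - cycle_count
--     return len(p1) - cycle_count
-- ===== SOURCE B (Python) =====
-- def _reaches(f, j, i):
--     for _ in range(len(f)):
--         if j == i:
--             return True
--         j = f[j]
--     return j == i
--
-- def cayley_distance(p1, p2):
--     normalized_p2 = [p1.index(x) for x in p2]
--     cycles = 0
--     for i in range(len(normalized_p2)):
--         if not any(_reaches(normalized_p2, j, i) for j in range(i)):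
--             cycles += 1
--     return len(p1) - cycles
-- ===== Notes on version B (the rewrite author's own statement) =====
-- stated objective: alternative
-- what changed: Replaces the mutable visited-array cycle walk by a stateless characterization: index i starts a new cycle iff i is not forward-reachable from any smaller index, checked by a bounded pointer chase per pair instead of marking.
import Mathlib
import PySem

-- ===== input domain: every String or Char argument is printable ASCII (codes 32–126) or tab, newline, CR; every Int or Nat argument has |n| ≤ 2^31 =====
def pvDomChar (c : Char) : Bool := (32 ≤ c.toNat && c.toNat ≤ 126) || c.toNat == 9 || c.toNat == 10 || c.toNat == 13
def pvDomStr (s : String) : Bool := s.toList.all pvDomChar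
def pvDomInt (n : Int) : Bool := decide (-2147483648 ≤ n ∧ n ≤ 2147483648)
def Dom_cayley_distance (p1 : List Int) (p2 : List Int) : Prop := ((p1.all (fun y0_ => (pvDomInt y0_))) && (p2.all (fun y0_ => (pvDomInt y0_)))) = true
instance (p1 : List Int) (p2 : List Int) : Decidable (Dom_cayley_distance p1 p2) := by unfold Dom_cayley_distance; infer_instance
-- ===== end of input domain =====

-- B replaces A's mutable visited-array walk by a stateless reachability test (a cycle is counted
-- at i iff i is not forward-reachable from a smaller index); objective: alternative, not faster.

-- ===== PORT A =====

-- termination fact for the inner `while` of A (cited by `decreasing_by` below)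
theorem pvCountFalseSetLt (l : List Bool) (j : Nat) (hj : j < l.length)
    (hf : l.getD j false = false) : (l.set j true).count false < l.count false := by
  induction l generalizing j with
  | nil => simp at hj
  | cons b t ih =>
    cases j with
    | zero =>
      simp [List.getD] at hf
      simp [List.set, hf]
    | succ j =>
      have hj' : j < t.length := by simpa using hj
      have hf' : t.getD j false = false := by simpa [List.getD] using hf
      have := ih j hj' hf'
      simp [List.set, List.count_cons]
      omega

-- while not visited[j]: visited[j] = True; j = normalized_p2[j]
def walkA (nf : List Nat) (j : Nat) (vis : List Bool) : List Bool :=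
  if h : j < vis.length ∧ vis.getD j false = false then
    walkA nf (nf.getD j 0) (vis.set j true)
  else vis
termination_by vis.count false
decreasing_by exact pvCountFalseSetLt vis j h.1 h.2

-- for i in range(n): if not visited[i]: cycle_count += 1; <walk>
def loopA (nf : List Nat) : List Nat → List Bool → Nat → Nat
  | [], _, cnt => cnt
  | i :: is, vis, cnt =>
    if vis.getD i false = false then loopA nf is (walkA nf i vis) (cnt + 1)
    else loopA nf is vis cnt

def cayley_distance (p1 : List Int) (p2 : List Int) : Int :=
  match p2.mapM (fun x => PySem.List.index? p1 x) with
  | none => 0  -- Python raises ValueError here (x not in p1); excluded by Pre_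
  | some nf =>
    (p1.length : Int) - (loopA nf (List.range nf.length) (List.replicate nf.length false) 0 : Int)

-- ===== PORT B =====

-- _reaches: for _ in range(len(f)): if j == i: return True; j = f[j]; return j == i
def reachLoop (nf : List Nat) (i : Nat) : Nat → Nat → Bool
  | 0, j => j == i
  | fuel + 1, j => if j == i then true else reachLoop nf i fuel (nf.getD j 0)

-- for i in range(n): if not any(_reaches(f, j, i) for j in range(i)): cycles += 1
def loopB (nf : List Nat) : List Nat → Nat → Nat
  | [], cnt => cnt
  | i :: is, cnt =>
    loopB nf is (if (List.range i).any (fun j => reachLoop nf i nf.length j) then cnt else cnt + 1)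

def cayley_distance_alt (p1 : List Int) (p2 : List Int) : Int :=
  match p2.mapM (fun x => PySem.List.index? p1 x) with
  | none => 0  -- Python raises ValueError here (x not in p1); excluded by Pre_
  | some nf =>
    (p1.length : Int) - (loopB nf (List.range nf.length) 0 : Int)

-- ===== PRECONDITION & SPEC =====

-- Pre_ is exactly the set of inputs on which A returns normally: every element of p2 occurs in p1
-- (else the list comprehension raises ValueError) and its first-occurrence index in p1 is a valid
-- index of p2 (else the visited walk raises IndexError).
def Pre_cayley_distance (p1 : List Int) (p2 : List Int) : Prop :=
  ∀ x ∈ p2, x ∈ p1 ∧ (PySem.List.index? p1 x).getD 0 < p2.length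
instance (p1 : List Int) (p2 : List Int) : Decidable (Pre_cayley_distance p1 p2) := by
  unfold Pre_cayley_distance; infer_instance

def pvWitness_cayley_distance : List Int × List Int := ([3, 1, 2], [2, 3, 1])

def Spec_cayley_distance (p1 : List Int) (p2 : List Int) (out : Int) : Prop := out = cayley_distance_alt p1 p2
instance (p1 : List Int) (p2 : List Int) (out : Int) : Decidable (Spec_cayley_distance p1 p2 out) := by unfold Spec_cayley_distance; infer_instance

-- ===== CLAIM (what is proved, stated in full; the proofs are below) =====
def Claim_equal_cayley_distance : Prop := ∀ (p1 : List Int) (p2 : List Int), Dom_cayley_distance p1 p2 → Pre_cayley_distance p1 p2 → Spec_cayley_distance p1 p2 (cayley_distance p1 p2)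

-- ===== LEMMAS AND PROOFS =====

-- the functional graph: j ↦ nf[j]
def gfun (nf : List Nat) (j : Nat) : Nat := nf.getD j 0
-- forward reachability in the functional graph
def Reach (nf : List Nat) (j x : Nat) : Prop := ∃ k, (gfun nf)^[k] j = x

theorem iter_lt (nf : List Nat) (hg : ∀ j, j < nf.length → gfun nf j < nf.length)
    (m j : Nat) (hj : j < nf.length) : (gfun nf)^[m] j < nf.length := by
  induction m with
  | zero => simpa using hj
  | succ m ih =>
    rw [Function.iterate_succ_apply']
    exact hg _ ih

theorem Reach_trans (nf : List Nat) (a b c : Nat) (h1 : Reach nf a b) (h2 : Reach nf b c) :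
    Reach nf a c := by
  obtain ⟨k1, h1⟩ := h1
  obtain ⟨k2, h2⟩ := h2
  exact ⟨k2 + k1, by rw [Function.iterate_add_apply, h1, h2]⟩

theorem reach_step (nf : List Nat) (j x : Nat) (h : Reach nf j x) : Reach nf j (gfun nf x) := by
  obtain ⟨k, hk⟩ := h
  exact ⟨k + 1, by rw [Function.iterate_succ_apply', hk]⟩

theorem getD_true_lt (l : List Bool) (x : Nat) (h : l.getD x false = true) : x < l.length := by
  by_contra hge
  have hnone : l.getD x false = false := by
    simp [List.getD, List.getElem?_eq_none (by omega : l.length ≤ x)]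
  rw [hnone] at h
  exact Bool.false_ne_true h

theorem reach_bound (nf : List Nat) (hg : ∀ j, j < nf.length → gfun nf j < nf.length)
    (j : Nat) (hj : j < nf.length) (i : Nat) (h : Reach nf j i) :
    ∃ k, k ≤ nf.length ∧ (gfun nf)^[k] j = i := by
  classical
  have hKspec : (gfun nf)^[Nat.find h] j = i := Nat.find_spec h
  by_cases hKn : Nat.find h ≤ nf.length
  · exact ⟨Nat.find h, hKn, hKspec⟩
  · exfalso
    obtain ⟨a, ha, b, hb, hne, heq⟩ := Finset.exists_ne_map_eq_of_card_lt_of_maps_to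
      (s := Finset.range (nf.length + 1)) (t := Finset.range nf.length)
      (by simpa using Nat.lt_succ_self nf.length)
      (fun m _ => Finset.mem_range.mpr (iter_lt nf hg m j hj))
    simp only [Finset.mem_range] at ha hb
    have key : ∀ a b, a < b → b ≤ nf.length → (gfun nf)^[a] j = (gfun nf)^[b] j → False := by
      intro a b hab hbn heq
      have h1 : (gfun nf)^[Nat.find h] j = (gfun nf)^[Nat.find h - b] ((gfun nf)^[b] j) := by
        rw [← Function.iterate_add_apply]
        congr 1
        omega
      rw [← heq, ← Function.iterate_add_apply] at h1
      rw [h1] at hKspec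
      exact Nat.find_min h (show Nat.find h - b + a < Nat.find h by omega) hKspec
    rcases Nat.lt_or_gt_of_ne hne with hab | hab
    · exact key a b hab (by omega) heq
    · exact key b a hab (by omega) heq.symm

theorem walkA_steps (nf : List Nat) (hg : ∀ j, j < nf.length → gfun nf j < nf.length) :
    ∀ (k j : Nat) (vis : List Bool), j < nf.length → vis.length = nf.length →
      (∀ m, m < k → vis.getD ((gfun nf)^[m] j) false = false) →
      (∀ a b, a < b → b < k → (gfun nf)^[a] j ≠ (gfun nf)^[b] j) →
      (vis.getD ((gfun nf)^[k] j) false = true ∨ ∃ m, m < k ∧ (gfun nf)^[k] j = (gfun nf)^[m] j) →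
      (walkA nf j vis).length = nf.length ∧
        ∀ x, ((walkA nf j vis).getD x false = true ↔
          (vis.getD x false = true ∨ ∃ m, m < k ∧ (gfun nf)^[m] j = x)) := by
  intro k
  induction k with
  | zero =>
    intro j vis hj hlen hfalse hdist hterm
    have ht : vis.getD j false = true := by
      rcases hterm with h | ⟨m, hm, _⟩
      · simpa using h
      · omega
    have ht' : vis[j]?.getD false = true := by simpa [List.getD] using ht
    rw [walkA, dif_neg (by simp [List.getD, ht'])]
    exact ⟨hlen, fun x => by simp⟩
  | succ k ih =>
    intro j vis hj hlen hfalse hdist hterm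
    have h0 : vis.getD j false = false := by simpa using hfalse 0 (Nat.succ_pos k)
    rw [walkA, dif_pos ⟨by omega, h0⟩]
    have e : ∀ m, (gfun nf)^[m] (nf.getD j 0) = (gfun nf)^[m + 1] j := fun m => by
      rw [Function.iterate_succ_apply]
      rfl
    have hjlen : j < vis.length := by omega
    have hgj : gfun nf j < nf.length := hg j hj
    have hfalse' : ∀ m, m < k →
        (vis.set j true).getD ((gfun nf)^[m] (nf.getD j 0)) false = false := by
      intro m hm
      rw [e m]
      have hne : j ≠ (gfun nf)^[m + 1] j := by
        have := hdist 0 (m + 1) (by omega) (by omega)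
        simpa using this
      have hstep : (vis.set j true).getD ((gfun nf)^[m + 1] j) false =
          vis.getD ((gfun nf)^[m + 1] j) false := by
        simp only [List.getD, List.getElem?_set_ne hne]
      rw [hstep]
      exact hfalse (m + 1) (by omega)
    have hdist' : ∀ a b, a < b → b < k →
        (gfun nf)^[a] (nf.getD j 0) ≠ (gfun nf)^[b] (nf.getD j 0) := by
      intro a b hab hb
      rw [e a, e b]
      exact hdist (a + 1) (b + 1) (by omega) (by omega)
    have hterm' : (vis.set j true).getD ((gfun nf)^[k] (nf.getD j 0)) false = true ∨
        ∃ m, m < k ∧ (gfun nf)^[k] (nf.getD j 0) = (gfun nf)^[m] (nf.getD j 0) := by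
      rw [e k]
      by_cases hxj : (gfun nf)^[k + 1] j = j
      · left
        rw [hxj]
        simp [List.getD, hjlen]
      · rcases hterm with ht | ⟨m, hm, he⟩
        · left
          have hstep : (vis.set j true).getD ((gfun nf)^[k + 1] j) false =
              vis.getD ((gfun nf)^[k + 1] j) false := by
            simp only [List.getD, List.getElem?_set_ne (Ne.symm hxj)]
          rw [hstep]
          exact ht
        · cases m with
          | zero =>
            exfalso
            exact hxj (by simpa using he)
          | succ m =>
            right
            refine ⟨m, by omega, ?_⟩
            rw [e m]
            exact he
    obtain ⟨ihlen, ihiff⟩ := ih (nf.getD j 0) (vis.set j true) hgj (by simpa using hlen)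
      hfalse' hdist' hterm'
    refine ⟨ihlen, fun x => ?_⟩
    rw [ihiff x]
    by_cases hx : x = j
    · subst hx
      constructor
      · intro _
        right
        exact ⟨0, by omega, by simp⟩
      · intro _
        left
        simp [List.getD, hjlen]
    · have hne2 : j ≠ x := fun h => hx h.symm
      have hset : (vis.set j true).getD x false = vis.getD x false := by
        simp only [List.getD, List.getElem?_set_ne hne2]
      rw [hset]
      constructor
      · rintro (h | ⟨m, hm, he⟩)
        · exact Or.inl h
        · refine Or.inr ⟨m + 1, by omega, ?_⟩
          rw [← e m]
          exact he
      · rintro (h | ⟨m, hm, he⟩)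
        · exact Or.inl h
        · cases m with
          | zero => exact absurd (by simpa using he) (fun h : j = x => hx h.symm)
          | succ m =>
            refine Or.inr ⟨m, by omega, ?_⟩
            rw [e m]
            exact he

theorem walkA_spec (nf : List Nat) (hg : ∀ j, j < nf.length → gfun nf j < nf.length)
    (i : Nat) (hi : i < nf.length) (vis : List Bool) (hlen : vis.length = nf.length)
    (hclosed : ∀ x, vis.getD x false = true → vis.getD (gfun nf x) false = true) :
    (walkA nf i vis).length = nf.length ∧
      ∀ x, ((walkA nf i vis).getD x false = true ↔ (vis.getD x false = true ∨ Reach nf i x)) := by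
  classical
  have hexT : ∃ k, (vis.getD ((gfun nf)^[k] i) false = true ∨
      ∃ m, m < k ∧ (gfun nf)^[k] i = (gfun nf)^[m] i) := by
    obtain ⟨a, ha, b, hb, hne, heq⟩ := Finset.exists_ne_map_eq_of_card_lt_of_maps_to
      (s := Finset.range (nf.length + 1)) (t := Finset.range nf.length)
      (by simpa using Nat.lt_succ_self nf.length)
      (fun m _ => Finset.mem_range.mpr (iter_lt nf hg m i hi))
    rcases Nat.lt_or_gt_of_ne hne with hab | hab
    · exact ⟨b, Or.inr ⟨a, hab, heq.symm⟩⟩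
    · exact ⟨a, Or.inr ⟨b, hab, heq⟩⟩
  have hKspec := Nat.find_spec hexT
  have hfalse : ∀ m, m < Nat.find hexT → vis.getD ((gfun nf)^[m] i) false = false := by
    intro m hm
    cases hcase : vis.getD ((gfun nf)^[m] i) false with
    | false => rfl
    | true => exact absurd (Or.inl hcase) (Nat.find_min hexT hm)
  have hdist : ∀ a b, a < b → b < Nat.find hexT → (gfun nf)^[a] i ≠ (gfun nf)^[b] i := by
    intro a b hab hb heq
    exact Nat.find_min hexT hb (Or.inr ⟨a, hab, heq.symm⟩)
  have hsteps := walkA_steps nf hg (Nat.find hexT) i vis hi hlen hfalse hdist hKspec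
  refine ⟨hsteps.1, fun x => ?_⟩
  rw [hsteps.2 x]
  constructor
  · rintro (h | ⟨m, _, he⟩)
    · exact Or.inl h
    · exact Or.inr ⟨m, he⟩
  · rintro (h | ⟨m, hm⟩)
    · exact Or.inl h
    · rcases hKspec with hvK | ⟨m0, hm0, hKm0⟩
      · rcases Nat.lt_or_ge m (Nat.find hexT) with hmK | hmK
        · exact Or.inr ⟨m, hmK, hm⟩
        · left
          have hchain : ∀ t, vis.getD ((gfun nf)^[Nat.find hexT + t] i) false = true := by
            intro t
            induction t with
            | zero => simpa using hvK
            | succ t iht =>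
              have hit : (gfun nf)^[Nat.find hexT + (t + 1)] i =
                  gfun nf ((gfun nf)^[Nat.find hexT + t] i) := by
                rw [show Nat.find hexT + (t + 1) = (Nat.find hexT + t) + 1 by omega,
                  Function.iterate_succ_apply']
              rw [hit]
              exact hclosed _ iht
          have := hchain (m - Nat.find hexT)
          rw [show Nat.find hexT + (m - Nat.find hexT) = m by omega, hm] at this
          exact this
      · have htail : ∀ m', ∃ m'', m'' < Nat.find hexT ∧
            (gfun nf)^[m'] i = (gfun nf)^[m''] i := by
          intro m'
          induction m' with
          | zero => exact ⟨0, by omega, rfl⟩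
          | succ m' ihm =>
            obtain ⟨m'', hm''K, he⟩ := ihm
            have hstep : (gfun nf)^[m' + 1] i = (gfun nf)^[m'' + 1] i := by
              rw [Function.iterate_succ_apply', Function.iterate_succ_apply', he]
            rcases Nat.lt_or_ge (m'' + 1) (Nat.find hexT) with hlt | hge
            · exact ⟨m'' + 1, hlt, hstep⟩
            · have hKeq : m'' + 1 = Nat.find hexT := by omega
              exact ⟨m0, hm0, by rw [hstep, hKeq, hKm0]⟩
        obtain ⟨m'', hm''K, he⟩ := htail m
        exact Or.inr ⟨m'', hm''K, by rw [← he, hm]⟩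

theorem reachLoop_sound (nf : List Nat) (i : Nat) :
    ∀ (fuel j : Nat), reachLoop nf i fuel j = true → Reach nf j i := by
  intro fuel
  induction fuel with
  | zero =>
    intro j h
    simp only [reachLoop] at h
    exact ⟨0, by simpa using Nat.eq_of_beq_eq_true (by simpa using h)⟩
  | succ fuel ih =>
    intro j h
    rw [reachLoop] at h
    by_cases hji : j = i
    · exact ⟨0, by simpa using hji⟩
    · rw [if_neg (by simp [hji])] at h
      obtain ⟨k, hk⟩ := ih (nf.getD j 0) h
      exact ⟨k + 1, by rw [Function.iterate_succ_apply]; exact hk⟩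
    
theorem reachLoop_complete (nf : List Nat) (i : Nat) :
    ∀ (fuel j k : Nat), k ≤ fuel → (gfun nf)^[k] j = i → reachLoop nf i fuel j = true := by
  intro fuel
  induction fuel with
  | zero =>
    intro j k hk h
    have hk0 : k = 0 := by omega
    subst hk0
    have hj : j = i := by simpa using h
    simp [reachLoop, hj]
  | succ fuel ih =>
    intro j k hk h
    rw [reachLoop]
    by_cases hji : j = i
    · rw [if_pos (by simp [hji])]
    · rw [if_neg (by simp [hji])]
      cases k with
      | zero => exact absurd (by simpa using h) hji
      | succ k =>
        apply ih (nf.getD j 0) k (by omega)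
        show (gfun nf)^[k] (gfun nf j) = i
        rw [← Function.iterate_succ_apply]
        exact h

theorem reachB_iff (nf : List Nat) (hg : ∀ j, j < nf.length → gfun nf j < nf.length)
    (i j : Nat) (hj : j < nf.length) :
    (reachLoop nf i nf.length j = true) ↔ Reach nf j i := by
  constructor
  · exact reachLoop_sound nf i nf.length j
  · intro h
    obtain ⟨k, hk, he⟩ := reach_bound nf hg j hj i h
    exact reachLoop_complete nf i nf.length j k hk he

theorem loop_eq (nf : List Nat) (hg : ∀ j, j < nf.length → gfun nf j < nf.length) :
    ∀ (k i : Nat) (vis : List Bool) (cnt : Nat), i + k = nf.length →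
      vis.length = nf.length →
      (∀ x, x < nf.length → (vis.getD x false = true ↔ ∃ j, j < i ∧ Reach nf j x)) →
      loopA nf (List.range' i k) vis cnt = loopB nf (List.range' i k) cnt := by
  intro k
  induction k with
  | zero =>
    intro i vis cnt _ _ _
    simp [loopA, loopB]
  | succ k ih =>
    intro i vis cnt hik hlen hvis
    have hi : i < nf.length := by omega
    rw [List.range'_succ]
    simp only [loopA, loopB]
    have hany : (List.range i).any (fun j => reachLoop nf i nf.length j) = true ↔
        ∃ j, j < i ∧ Reach nf j i := by
      rw [List.any_eq_true]
      constructor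
      · rintro ⟨j, hjmem, hjr⟩
        have hji : j < i := List.mem_range.mp hjmem
        exact ⟨j, hji, (reachB_iff nf hg i j (by omega)).mp hjr⟩
      · rintro ⟨j, hji, hr⟩
        exact ⟨j, List.mem_range.mpr hji, (reachB_iff nf hg i j (by omega)).mpr hr⟩
    have hkey := hvis i hi
    by_cases hex : ∃ j, j < i ∧ Reach nf j i
    · have htrue : vis.getD i false = true := hkey.mpr hex
      have htrue' : vis[i]?.getD false = true := by simpa [List.getD] using htrue
      rw [if_neg (by simp [List.getD, htrue']), if_pos (hany.mpr hex)]
      apply ih (i + 1) vis cnt (by omega) hlen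
      intro x hx
      rw [hvis x hx]
      constructor
      · rintro ⟨j, h1, h2⟩
        exact ⟨j, by omega, h2⟩
      · rintro ⟨j, h1, h2⟩
        rcases Nat.lt_or_ge j i with h | h
        · exact ⟨j, h, h2⟩
        · have heq : j = i := by omega
          rw [heq] at h2
          obtain ⟨j0, hj0, hr0⟩ := hex
          exact ⟨j0, hj0, Reach_trans nf j0 i x hr0 h2⟩
    · have hfalse : vis.getD i false = false := by
        cases hcase : vis.getD i false with
        | false => rfl
        | true => exact absurd (hkey.mp hcase) hex
      rw [if_pos hfalse, if_neg (fun h => hex (hany.mp h))]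
      have hclosed : ∀ x, vis.getD x false = true → vis.getD (gfun nf x) false = true := by
        intro x hxt
        have hxlt : x < vis.length := getD_true_lt vis x hxt
        have hxn : x < nf.length := by omega
        obtain ⟨j, hj, hr⟩ := (hvis x hxn).mp hxt
        exact (hvis (gfun nf x) (hg x hxn)).mpr ⟨j, hj, reach_step nf j x hr⟩
      obtain ⟨hlen', hiff⟩ := walkA_spec nf hg i hi vis hlen hclosed
      apply ih (i + 1) _ (cnt + 1) (by omega) hlen'
      intro x hx
      rw [hiff x, hvis x hx]
      constructor
      · rintro (⟨j, h1, h2⟩ | h)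
        · exact ⟨j, by omega, h2⟩
        · exact ⟨i, by omega, h⟩
      · rintro ⟨j, h1, h2⟩
        rcases Nat.lt_or_ge j i with h | h
        · exact Or.inl ⟨j, h, h2⟩
        · have heq : j = i := by omega
          rw [heq] at h2
          exact Or.inr h2

theorem mapM_index?_eq (p1 p2 : List Int) (hmem : ∀ x ∈ p2, x ∈ p1) :
    p2.mapM (fun x => PySem.List.index? p1 x) =
      some (p2.map (fun x => (PySem.List.index? p1 x).getD 0)) := by
  induction p2 with
  | nil => simp
  | cons a l ih =>
    have ha : a ∈ p1 := hmem a (List.mem_cons_self)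
    have hsome : (PySem.List.index? p1 a).isSome :=
      (PySem.List.index?_isSome_iff p1 a).mpr ha
    obtain ⟨k, hk⟩ := Option.isSome_iff_exists.mp hsome
    have hk' : List.idxOf? a p1 = some k := by
      rw [← PySem.List.index?_eq_idxOf?]
      exact hk
    have ih' := ih (fun x hx => hmem x (List.mem_cons_of_mem a hx))
    simp only [PySem.List.index?_eq_idxOf?] at ih'
    simp [List.mapM_cons, hk', ih']

-- ===== VERDICT (by name: the statement is the Claim_ definition above) =====
theorem cayley_distance_spec : Claim_equal_cayley_distance := by
  intro p1 p2 _ hpre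
  unfold Pre_cayley_distance at hpre
  have hmem : ∀ x ∈ p2, x ∈ p1 := fun x hx => (hpre x hx).1
  unfold Spec_cayley_distance cayley_distance cayley_distance_alt
  rw [mapM_index?_eq p1 p2 hmem]
  have hg : ∀ j, j < (p2.map (fun x => (PySem.List.index? p1 x).getD 0)).length →
      gfun (p2.map (fun x => (PySem.List.index? p1 x).getD 0)) j <
        (p2.map (fun x => (PySem.List.index? p1 x).getD 0)).length := by
    intro j hj
    unfold gfun
    rw [List.getD_eq_getElem _ _ hj]
    have hjp : j < p2.length := by simpa using hj
    have hgm : (p2.map (fun x => (PySem.List.index? p1 x).getD 0))[j] =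
        (PySem.List.index? p1 p2[j]).getD 0 := by
      simp
    rw [hgm, List.length_map]
    exact (hpre p2[j] (List.getElem_mem hjp)).2
  set nf := p2.map (fun x => (PySem.List.index? p1 x).getD 0) with hnfdef
  show (p1.length : Int) - (loopA nf (List.range nf.length) (List.replicate nf.length false) 0 : Int)
      = (p1.length : Int) - (loopB nf (List.range nf.length) 0 : Int)
  have key : loopA nf (List.range nf.length) (List.replicate nf.length false) 0
      = loopB nf (List.range nf.length) 0 := by
    rw [List.range_eq_range']
    exact loop_eq nf hg nf.length 0 (List.replicate nf.length false) 0 (by omega)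
      (by simp) (by intro x hx; simp [List.getD])
  rw [key]
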